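-- pv_equiv track=rewrite | github.com/liuguangxi/rosecode | Codes/rc311/rc311.py | nimber_product
-- ===== SOURCE A (Python) =====
-- def ilog2(n):
--   return 0 if n <= 0 else n.bit_length() - 1
--
-- def nimber_lv(n):
--   if n <= 1:
--     return 0
--   return ilog2(ilog2(n)) + 1
--
-- def nimber_combine(n, a, b):
--   return (b << (1 << n)) | a
--
-- def nimber_split(n, a):
--   t = 1 << n
--   return a & ((1 << t) - 1), a >> t
--
-- def nimber_product_half(n, a):
--   if n == 0:
--     return a
--   if a == 0:
--     return 0
--   lo, hi = nimber_split(n - 1, a)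
--   lo, hi = \
--     nimber_product_half(n - 1, nimber_product_half(n - 1, hi)), \
--     nimber_product_half(n - 1, hi ^ lo)
--   return nimber_combine(n - 1, lo, hi)
--
-- def nimber_square(a):
--   if a <= 1:
--     return a
--   lv = nimber_lv(a)
--   lo, hi = nimber_split(lv - 1, a)
--   lo = nimber_square(lo)
--   hi = nimber_square(hi)
--   lo = nimber_product_half(lv - 1, hi) ^ lo
--   return nimber_combine(lv - 1, lo, hi)
--
-- def nimber_product(a, b):
--   if a == b:
--     return nimber_square(a)
--
--   if a < b:
--     a, b = b, a
--
--   if a <= 1: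
--     return a & b
--
--   lv_a = nimber_lv(a)
--   lv_b = nimber_lv(b)
--
--   a_lo, a_hi = nimber_split(lv_a - 1, a)
--   if lv_a > lv_b:
--     hi = nimber_product(a_hi, b)
--     lo = nimber_product(a_lo, b)
--     return nimber_combine(lv_a - 1, lo, hi)
--
--   b_lo, b_hi = nimber_split(lv_a - 1, b)
--   w0 = nimber_product(a_lo, b_lo)
--   w1 = nimber_product(a_lo ^ a_hi, b_lo ^ b_hi)
--   w2 = nimber_product_half(lv_a - 1, nimber_product(a_hi, b_hi))
--   return nimber_combine(lv_a - 1, w0 ^ w2, w0 ^ w1)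
-- ===== SOURCE B (Python) =====
-- def _half(n, a):
--     # nim-product of a with 2^(2^n - 1), the "half" constant of the level-n field
--     if n == 0:
--         return a
--     t = 1 << (n - 1)
--     a0, a1 = a & ((1 << t) - 1), a >> t
--     return (_half(n - 1, a0 ^ a1) << t) | _half(n - 1, _half(n - 1, a1))
--
-- def _mul(n, a, b):
--     # schoolbook nim-multiplication in the field GF(2^(2^n))
--     if n == 0:
--         return a & b
--     t = 1 << (n - 1)
--     mask = (1 << t) - 1
--     a0, a1 = a & mask, a >> t
--     b0, b1 = b & mask, b >> t
--     p11 = _mul(n - 1, a1, b1)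
--     hi = _mul(n - 1, a0, b1) ^ _mul(n - 1, a1, b0) ^ p11
--     lo = _mul(n - 1, a0, b0) ^ _half(n - 1, p11)
--     return (hi << t) | lo
--
-- def nimber_product(a, b):
--     # find the least tower level n with a, b < 2^(2^n)
--     n = 0
--     while a >= (1 << (1 << n)) or b >= (1 << (1 << n)):
--         n += 1
--     return _mul(n, a, b)
-- ===== Notes on version B (the rewrite author's own statement) =====
-- stated objective: simpler
-- what changed: Replaces A's Karatsuba-style recursion with its three special paths (square, unequal-level distribution, equal-level 3-multiplication) by one uniform schoolbook field-tower recursion: pick the least n with a,b < 2^(2^n) and combine four recursive sub-products per level; Pre_ excludes mixed-sign pairs whose nonnegative factor is at least 2 — negative integers are not nimbers, and there A's and B's recursions return two different accidental two's-complement values, neither of which anyone would specify.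
-- outside the precondition, e.g. on nimber_product(-13, 9): A returns 9, B returns 7; on nimber_product(9, -13): A returns 9, B returns 7; on nimber_product(2, -1): A returns 2, B returns 1
import Mathlib
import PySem

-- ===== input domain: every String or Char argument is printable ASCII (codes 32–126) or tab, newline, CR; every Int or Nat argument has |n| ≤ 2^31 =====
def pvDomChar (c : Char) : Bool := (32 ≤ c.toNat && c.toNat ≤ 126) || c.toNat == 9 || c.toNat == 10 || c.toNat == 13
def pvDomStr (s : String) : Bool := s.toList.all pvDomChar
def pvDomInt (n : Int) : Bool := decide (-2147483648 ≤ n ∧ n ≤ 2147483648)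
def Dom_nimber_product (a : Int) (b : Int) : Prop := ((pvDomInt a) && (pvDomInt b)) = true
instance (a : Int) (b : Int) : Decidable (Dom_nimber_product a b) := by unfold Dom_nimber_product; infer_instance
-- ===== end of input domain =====

-- B replaces A's Karatsuba recursion (with its square / unequal-level / 3-multiplication paths)
-- by one uniform schoolbook field-tower recursion; the two functions agree on every input
-- admitted by Pre_ (all nonnegative pairs, and every pair with both factors <= 1).

-- ===== PORT A =====
-- Python ilog2(n): 0 if n <= 0 else n.bit_length()-1; for n ≥ 1, bit_length-1 = Nat.log2.
def ilog2N (n : Nat) : Nat := if n = 0 then 0 else Nat.log2 n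

-- Python's bitwise &, |, ^ on int (two's complement with sign extension; exact for ALL ints)
def pyAnd (x y : Int) : Int :=
  if 0 ≤ x then
    if 0 ≤ y then Int.ofNat (x.toNat &&& y.toNat)
    else Int.ofNat ((x.toNat ||| (-y-1).toNat) ^^^ (-y-1).toNat)
  else
    if 0 ≤ y then Int.ofNat ((y.toNat ||| (-x-1).toNat) ^^^ (-x-1).toNat)
    else -(Int.ofNat ((-x-1).toNat ||| (-y-1).toNat)) - 1

def pyOr (x y : Int) : Int :=
  if 0 ≤ x then
    if 0 ≤ y then Int.ofNat (x.toNat ||| y.toNat)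
    else -(Int.ofNat (((-y-1).toNat ||| x.toNat) ^^^ x.toNat)) - 1
  else
    if 0 ≤ y then -(Int.ofNat (((-x-1).toNat ||| y.toNat) ^^^ y.toNat)) - 1
    else -(Int.ofNat ((-x-1).toNat &&& (-y-1).toNat)) - 1

def pyXor (x y : Int) : Int :=
  if 0 ≤ x then
    if 0 ≤ y then Int.ofNat (x.toNat ^^^ y.toNat)
    else -(Int.ofNat (x.toNat ^^^ (-y-1).toNat)) - 1
  else
    if 0 ≤ y then -(Int.ofNat ((-x-1).toNat ^^^ y.toNat)) - 1
    else Int.ofNat ((-x-1).toNat ^^^ (-y-1).toNat)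

-- Python nimber_lv(n): 0 if n <= 1 else ilog2(ilog2(n)) + 1.  Its value is a small
-- nonnegative int used as a level index, so it is carried as ℕ (for n ≥ 2, n.toNat is exact).
def nimLvI (n : Int) : Nat := if n ≤ 1 then 0 else ilog2N (ilog2N n.toNat) + 1

-- Python nimber_combine(n, a, b) = (b << (1 << n)) | a;  b << t = b * 2^t for every int
def nimCombineI (n : Nat) (a b : Int) : Int := pyOr (b * (2:Int) ^ (2 ^ n)) a

-- Python nimber_split(n, a) = (a & ((1 << t) - 1), a >> t) with t = 1 << n;  >> is a floor
-- (arithmetic) shift on int, which is exactly Int.shiftRight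
def nimSplitI (n : Nat) (a : Int) : Int × Int := (pyAnd a ((2:Int) ^ (2 ^ n) - 1), a >>> (2 ^ n))

def nimProductHalfI : Nat → Int → Int
  | 0, a => a
  | n+1, a =>
    if a = 0 then 0
    else
      let s := nimSplitI n a
      nimCombineI n (nimProductHalfI n (nimProductHalfI n s.2)) (nimProductHalfI n (pyXor s.2 s.1))

-- fuel only bounds the recursion depth (each recursive argument is strictly smaller in
-- absolute value); with fuel > |a| it never runs out
def nimSquareI : Nat → Int → Int
  | 0, a => a
  | μ+1, a =>
    if a ≤ 1 then a
    else
      let lv := nimLvI a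
      let s := nimSplitI (lv - 1) a
      let lo := nimSquareI μ s.1
      let hi := nimSquareI μ s.2
      nimCombineI (lv - 1) (pyXor (nimProductHalfI (lv - 1) hi) lo) hi

-- fuel bounds the recursion depth (the measure 2*(|a|+|b|)+[a<b] strictly decreases on
-- every recursive call); with fuel > that measure it never runs out
def nimProdI : Nat → Int → Int → Int
  | 0, _, _ => 0
  | μ+1, a, b =>
    if a = b then nimSquareI (a.natAbs + 1) a
    else if a < b then nimProdI μ b a
    else if a ≤ 1 then pyAnd a b
    else
      let lva := nimLvI a
      let lvb := nimLvI b
      let sa := nimSplitI (lva - 1) a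
      if lvb < lva then
        nimCombineI (lva - 1) (nimProdI μ sa.1 b) (nimProdI μ sa.2 b)
      else
        let sb := nimSplitI (lva - 1) b
        let w0 := nimProdI μ sa.1 sb.1
        let w1 := nimProdI μ (pyXor sa.1 sa.2) (pyXor sb.1 sb.2)
        let w2 := nimProductHalfI (lva - 1) (nimProdI μ sa.2 sb.2)
        nimCombineI (lva - 1) (pyXor w0 w2) (pyXor w0 w1)

def nimber_product (a : Int) (b : Int) : Int :=
  nimProdI (2 * (a.natAbs + b.natAbs) + 2) a b


-- ===== PORT B =====
def nimHalfBI : Nat → Int → Int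
  | 0, a => a
  | n+1, a =>
    let a0 := pyAnd a ((2:Int) ^ (2 ^ n) - 1)
    let a1 := a >>> (2 ^ n)
    pyOr (nimHalfBI n (pyXor a0 a1) * (2:Int) ^ (2 ^ n)) (nimHalfBI n (nimHalfBI n a1))

def nimMulBI : Nat → Int → Int → Int
  | 0, a, b => pyAnd a b
  | n+1, a, b =>
    let mask := (2:Int) ^ (2 ^ n) - 1
    let a0 := pyAnd a mask
    let a1 := a >>> (2 ^ n)
    let b0 := pyAnd b mask
    let b1 := b >>> (2 ^ n)
    let p11 := nimMulBI n a1 b1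
    let hi := pyXor (pyXor (nimMulBI n a0 b1) (nimMulBI n a1 b0)) p11
    let lo := pyXor (nimMulBI n a0 b0) (nimHalfBI n p11)
    pyOr (hi * (2:Int) ^ (2 ^ n)) lo

-- Source B's level-search while loop; the fuel only bounds the iteration count (on the
-- admitted inputs it never runs out)
def nimLevelBI : Nat → Int → Int → Nat → Nat
  | 0, _, _, n => n
  | μ+1, a, b, n =>
    if (2:Int) ^ (2 ^ n) ≤ a ∨ (2:Int) ^ (2 ^ n) ≤ b then nimLevelBI μ a b (n + 1) else n

def nimber_product_alt (a : Int) (b : Int) : Int :=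
  nimMulBI (nimLevelBI (a.natAbs + b.natAbs + 1) a b 0) a b

-- ===== PRECONDITION & SPEC =====
-- Pre_ excludes mixed-sign pairs whose nonnegative factor is at least 2: negative integers
-- are not nimbers, and on those pairs A's and B's recursions return two different accidental
-- two's-complement values, neither of which anyone would specify.
def Pre_nimber_product (a : Int) (b : Int) : Prop := (0 ≤ a ∧ 0 ≤ b) ∨ (a ≤ 1 ∧ b ≤ 1)
instance (a : Int) (b : Int) : Decidable (Pre_nimber_product a b) := by unfold Pre_nimber_product; infer_instance
def pvWitness_nimber_product : Int × Int := (5, 9)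

def Spec_nimber_product (a : Int) (b : Int) (out : Int) : Prop := out = nimber_product_alt a b
instance (a : Int) (b : Int) (out : Int) : Decidable (Spec_nimber_product a b out) := by unfold Spec_nimber_product; infer_instance

-- ===== CLAIM (what is proved, stated in full; the proofs are below) =====
def Claim_equal_nimber_product : Prop := ∀ (a : Int) (b : Int), Dom_nimber_product a b → Pre_nimber_product a b → Spec_nimber_product a b (nimber_product a b)

-- ===== LEMMAS AND PROOFS =====

-- ℕ-model of port B's helpers (used only by the proofs; on nonnegative inputs the Int port
-- computes exactly these — see the *_cast bridge lemmas below)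
def nimHalfB : Nat → Nat → Nat
  | 0, a => a
  | n+1, a =>
    let t := 1 <<< n
    let a0 := a &&& ((1 <<< t) - 1)
    let a1 := a >>> t
    (nimHalfB n (a0 ^^^ a1) <<< t) ||| nimHalfB n (nimHalfB n a1)

def nimMulB : Nat → Nat → Nat → Nat
  | 0, a, b => a &&& b
  | n+1, a, b =>
    let t := 1 <<< n
    let mask := (1 <<< t) - 1
    let a0 := a &&& mask
    let a1 := a >>> t
    let b0 := b &&& mask
    let b1 := b >>> t
    let p11 := nimMulB n a1 b1
    let hi := nimMulB n a0 b1 ^^^ nimMulB n a1 b0 ^^^ p11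
    let lo := nimMulB n a0 b0 ^^^ nimHalfB n p11
    (hi <<< t) ||| lo

def nimLevelB : Nat → Nat → Nat → Nat → Nat
  | 0, _, _, n => n
  | μ+1, a, b, n =>
    if a >>> (1 <<< n) = 0 ∧ b >>> (1 <<< n) = 0 then n else nimLevelB μ a b (n + 1)

-- ℕ-model of port A (used only by the proofs; on the nonnegative domain the Int port
-- computes exactly these functions — see the *_eqI bridge lemmas below)
def nimLvN (n : Nat) : Nat := if n ≤ 1 then 0 else ilog2N (ilog2N n) + 1

def nimCombineN (n a b : Nat) : Nat := (b <<< (1 <<< n)) ||| a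

def nimSplitN (n a : Nat) : Nat × Nat := (a &&& ((1 <<< (1 <<< n)) - 1), a >>> (1 <<< n))

def nimProductHalfN : Nat → Nat → Nat
  | 0, a => a
  | n+1, a =>
    if a = 0 then 0
    else
      let s := nimSplitN n a
      nimCombineN n (nimProductHalfN n (nimProductHalfN n s.2)) (nimProductHalfN n (s.2 ^^^ s.1))

def nimSquareN : Nat → Nat → Nat
  | 0, a => a
  | μ+1, a =>
    if a ≤ 1 then a
    else
      let lv := nimLvN a
      let s := nimSplitN (lv - 1) a
      let lo := nimSquareN μ s.1
      let hi := nimSquareN μ s.2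
      nimCombineN (lv - 1) (nimProductHalfN (lv - 1) hi ^^^ lo) hi

def nimProdN : Nat → Nat → Nat → Nat
  | 0, _, _ => 0
  | μ+1, a, b =>
    if a = b then nimSquareN (a + 1) a
    else if a < b then nimProdN μ b a
    else if a ≤ 1 then a &&& b
    else
      let lva := nimLvN a
      let lvb := nimLvN b
      let sa := nimSplitN (lva - 1) a
      if lvb < lva then
        nimCombineN (lva - 1) (nimProdN μ sa.1 b) (nimProdN μ sa.2 b)
      else
        let sb := nimSplitN (lva - 1) b
        let w0 := nimProdN μ sa.1 sb.1
        let w1 := nimProdN μ (sa.1 ^^^ sa.2) (sb.1 ^^^ sb.2)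
        let w2 := nimProductHalfN (lva - 1) (nimProdN μ sa.2 sb.2)
        nimCombineN (lva - 1) (w0 ^^^ w2) (w0 ^^^ w1)


theorem splitN_fst (n a : Nat) : (nimSplitN n a).1 = a % 2 ^ 2 ^ n := by
  simp [nimSplitN, Nat.one_shiftLeft, Nat.and_two_pow_sub_one_eq_mod]

theorem splitN_snd (n a : Nat) : (nimSplitN n a).2 = a / 2 ^ 2 ^ n := by
  simp [nimSplitN, Nat.one_shiftLeft, Nat.shiftRight_eq_div_pow]

theorem lvN_one_le {a : Nat} (h : 2 ≤ a) : 1 ≤ nimLvN a := by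
  unfold nimLvN
  rw [if_neg (by omega)]
  omega

theorem lvN_lower {a : Nat} (h : 2 ≤ a) : 2 ^ 2 ^ (nimLvN a - 1) ≤ a := by
  have ha : a ≠ 0 := by omega
  have hm : 1 ≤ Nat.log2 a := (Nat.le_log2 ha).2 (by simpa using h)
  have hm0 : Nat.log2 a ≠ 0 := by omega
  have h1 : 2 ^ Nat.log2 (Nat.log2 a) ≤ Nat.log2 a := Nat.log2_self_le hm0
  have h2 : (2:Nat) ^ 2 ^ Nat.log2 (Nat.log2 a) ≤ 2 ^ Nat.log2 a :=
    Nat.pow_le_pow_right (by norm_num) h1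
  have h3 : (2:Nat) ^ Nat.log2 a ≤ a := Nat.log2_self_le ha
  have hlv : nimLvN a = Nat.log2 (Nat.log2 a) + 1 := by
    unfold nimLvN ilog2N
    rw [if_neg (by omega), if_neg ha, if_neg hm0]
  rw [hlv]
  simpa using le_trans h2 h3

theorem lvN_upper (a : Nat) : a < 2 ^ 2 ^ nimLvN a := by
  by_cases h : a ≤ 1
  · have hlv : nimLvN a = 0 := by unfold nimLvN; rw [if_pos h]
    rw [hlv]
    simpa using by omega
  · have ha : a ≠ 0 := by omega
    have hm : 1 ≤ Nat.log2 a := (Nat.le_log2 ha).2 (by omega)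
    have hm0 : Nat.log2 a ≠ 0 := by omega
    have h1 : a < 2 ^ (Nat.log2 a + 1) := Nat.lt_log2_self
    have h2 : Nat.log2 a < 2 ^ (Nat.log2 (Nat.log2 a) + 1) := Nat.lt_log2_self
    have hlv : nimLvN a = Nat.log2 (Nat.log2 a) + 1 := by
      unfold nimLvN ilog2N
      rw [if_neg h, if_neg ha, if_neg hm0]
    rw [hlv]
    calc a < 2 ^ (Nat.log2 a + 1) := h1
      _ ≤ 2 ^ 2 ^ (Nat.log2 (Nat.log2 a) + 1) := Nat.pow_le_pow_right (by norm_num) (by omega)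

theorem lvN_le_of_lt {a n : Nat} (h2 : 2 ≤ a) (h : a < 2 ^ 2 ^ n) : nimLvN a ≤ n := by
  have hl := lvN_lower h2
  have hlt : (2:Nat) ^ 2 ^ (nimLvN a - 1) < 2 ^ 2 ^ n := lt_of_le_of_lt hl h
  have h1 : 2 ^ (nimLvN a - 1) < 2 ^ n :=
    (Nat.pow_lt_pow_iff_right (by norm_num)).1 hlt
  have h2' : nimLvN a - 1 < n := (Nat.pow_lt_pow_iff_right (by norm_num)).1 h1
  have := lvN_one_le h2
  omega

theorem two_le_pow_pow (n : Nat) : 2 ≤ 2 ^ 2 ^ n :=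
  le_trans (by norm_num) (Nat.pow_le_pow_right (by norm_num) Nat.one_le_two_pow)

theorem pow_two_pow_succ (n : Nat) : (2:Nat) ^ 2 ^ (n+1) = 2 ^ 2 ^ n * 2 ^ 2 ^ n := by
  rw [← pow_add]
  congr 1
  rw [pow_succ]
  omega

theorem lvN_zero {a : Nat} (h : a ≤ 1) : nimLvN a = 0 := by
  unfold nimLvN; rw [if_pos h]

theorem div_pow_shiftLeft_succ_le (x n : Nat) :
    x / 2 ^ (1 <<< (n+1)) ≤ x / 2 ^ (1 <<< n) / 2 := by
  rw [Nat.div_div_eq_div_mul, ← pow_succ]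
  apply Nat.div_le_div_left _ (by positivity)
  apply Nat.pow_le_pow_right (by norm_num)
  simp only [Nat.one_shiftLeft]
  have h1 : (1:Nat) ≤ 2 ^ n := Nat.one_le_two_pow
  have h2 : (2:Nat) ^ (n+1) = 2 ^ n + 2 ^ n := by rw [pow_succ]; omega
  omega

theorem nxor_left_comm (a b c : Nat) : a ^^^ (b ^^^ c) = b ^^^ (a ^^^ c) := by
  rw [← Nat.xor_assoc, Nat.xor_comm a b, Nat.xor_assoc]

theorem append_eq_xor {t lo : Nat} (hi : Nat) (h : lo < 2 ^ t) :
    hi <<< t ||| lo = hi <<< t ^^^ lo := by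
  apply Nat.eq_of_testBit_eq
  intro k
  by_cases hk : k < t
  · have h1 : (hi <<< t).testBit k = false := by
      simp [Nat.testBit_shiftLeft]
      omega
    simp [Nat.testBit_xor, h1]
  · have h1 : lo.testBit k = false :=
      Nat.testBit_lt_two_pow (lt_of_lt_of_le h (Nat.pow_le_pow_right (by norm_num) (by omega)))
    simp [Nat.testBit_xor, h1]

theorem append_linear {t l1 l2 : Nat} (h1 h2 : Nat) (hl1 : l1 < 2 ^ t) (hl2 : l2 < 2 ^ t) :
    (h1 ^^^ h2) <<< t ||| (l1 ^^^ l2) = (h1 <<< t ||| l1) ^^^ (h2 <<< t ||| l2) := by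
  rw [append_eq_xor _ (Nat.xor_lt_two_pow hl1 hl2), append_eq_xor _ hl1, append_eq_xor _ hl2,
      Nat.shiftLeft_xor_distrib]
  simp [Nat.xor_comm, nxor_left_comm]

theorem append_congr {t h1 h2 l1 l2 : Nat} (hh : h1 = h2) (hl : l1 = l2) :
    h1 <<< t ||| l1 = h2 <<< t ||| l2 := by rw [hh, hl]

theorem mod_pow_xor (x y m : Nat) : (x ^^^ y) % 2 ^ m = x % 2 ^ m ^^^ y % 2 ^ m := by
  simp only [← Nat.and_two_pow_sub_one_eq_mod]
  exact Nat.and_xor_distrib_right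

theorem div_pow_xor (x y m : Nat) : (x ^^^ y) / 2 ^ m = x / 2 ^ m ^^^ y / 2 ^ m := by
  simp only [← Nat.shiftRight_eq_div_pow]
  exact Nat.shiftRight_xor_distrib

theorem div_pow_lt {a n : Nat} (h : a < 2 ^ 2 ^ (n+1)) : a / 2 ^ 2 ^ n < 2 ^ 2 ^ n := by
  rw [Nat.div_lt_iff_lt_mul (by positivity)]
  rw [pow_two_pow_succ] at h
  exact h

-- unfolding of the successor cases in %-and-/ form
theorem halfB_succ (n a : Nat) :
    nimHalfB (n+1) a =
      (nimHalfB n (a % 2 ^ 2 ^ n ^^^ a / 2 ^ 2 ^ n) <<< 2 ^ n) |||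
        nimHalfB n (nimHalfB n (a / 2 ^ 2 ^ n)) := by
  simp [nimHalfB, Nat.one_shiftLeft, Nat.and_two_pow_sub_one_eq_mod, Nat.shiftRight_eq_div_pow]

theorem mulB_succ (n a b : Nat) :
    nimMulB (n+1) a b =
      ((nimMulB n (a % 2 ^ 2 ^ n) (b / 2 ^ 2 ^ n) ^^^ nimMulB n (a / 2 ^ 2 ^ n) (b % 2 ^ 2 ^ n) ^^^
          nimMulB n (a / 2 ^ 2 ^ n) (b / 2 ^ 2 ^ n)) <<< 2 ^ n) |||
        (nimMulB n (a % 2 ^ 2 ^ n) (b % 2 ^ 2 ^ n) ^^^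
          nimHalfB n (nimMulB n (a / 2 ^ 2 ^ n) (b / 2 ^ 2 ^ n))) := by
  simp [nimMulB, Nat.one_shiftLeft, Nat.and_two_pow_sub_one_eq_mod, Nat.shiftRight_eq_div_pow]

theorem halfA_succ (n a : Nat) (h : a ≠ 0) :
    nimProductHalfN (n+1) a =
      (nimProductHalfN n (a / 2 ^ 2 ^ n ^^^ a % 2 ^ 2 ^ n) <<< 2 ^ n) |||
        nimProductHalfN n (nimProductHalfN n (a / 2 ^ 2 ^ n)) := by
  simp [nimProductHalfN, h, nimCombineN, splitN_fst, splitN_snd, Nat.one_shiftLeft]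

theorem combineN_eq (n lo hi : Nat) : nimCombineN n lo hi = hi <<< 2 ^ n ||| lo := by
  simp [nimCombineN, Nat.one_shiftLeft]

theorem halfB_zero : ∀ n, nimHalfB n 0 = 0
  | 0 => rfl
  | n+1 => by
    rw [halfB_succ]
    simp [halfB_zero n, Nat.zero_shiftLeft]

theorem halfB_lt : ∀ n {a : Nat}, a < 2 ^ 2 ^ n → nimHalfB n a < 2 ^ 2 ^ n
  | 0, a, h => h
  | n+1, a, h => by
    rw [halfB_succ, pow_two_pow_succ]
    have h0 : a % 2 ^ 2 ^ n < 2 ^ 2 ^ n := Nat.mod_lt _ (by positivity)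
    have h1 : a / 2 ^ 2 ^ n < 2 ^ 2 ^ n := div_pow_lt h
    rw [← pow_add]
    exact Nat.append_lt (halfB_lt n (halfB_lt n h1)) (halfB_lt n (Nat.xor_lt_two_pow h0 h1))

theorem halfB_xor : ∀ n {x y : Nat}, x < 2 ^ 2 ^ n → y < 2 ^ 2 ^ n →
    nimHalfB n (x ^^^ y) = nimHalfB n x ^^^ nimHalfB n y
  | 0, x, y, _, _ => rfl
  | n+1, x, y, hx, hy => by
    have hx0 : x % 2 ^ 2 ^ n < 2 ^ 2 ^ n := Nat.mod_lt _ (by positivity)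
    have hy0 : y % 2 ^ 2 ^ n < 2 ^ 2 ^ n := Nat.mod_lt _ (by positivity)
    have hx1 : x / 2 ^ 2 ^ n < 2 ^ 2 ^ n := div_pow_lt hx
    have hy1 : y / 2 ^ 2 ^ n < 2 ^ 2 ^ n := div_pow_lt hy
    rw [halfB_succ, halfB_succ, halfB_succ, mod_pow_xor, div_pow_xor]
    have e1 : x % 2 ^ 2 ^ n ^^^ y % 2 ^ 2 ^ n ^^^ (x / 2 ^ 2 ^ n ^^^ y / 2 ^ 2 ^ n)
        = (x % 2 ^ 2 ^ n ^^^ x / 2 ^ 2 ^ n) ^^^ (y % 2 ^ 2 ^ n ^^^ y / 2 ^ 2 ^ n) := by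
      simp [Nat.xor_comm, nxor_left_comm]
    rw [e1, halfB_xor n (Nat.xor_lt_two_pow hx0 hx1) (Nat.xor_lt_two_pow hy0 hy1),
        halfB_xor n hx1 hy1, halfB_xor n (halfB_lt n hx1) (halfB_lt n hy1)]
    exact append_linear _ _ (halfB_lt n (halfB_lt n hx1)) (halfB_lt n (halfB_lt n hy1))

theorem halfA_eq_halfB : ∀ n a, nimProductHalfN n a = nimHalfB n a
  | 0, a => rfl
  | n+1, a => by
    by_cases h : a = 0
    · rw [h]
      show nimProductHalfN (n+1) 0 = _
      rw [halfB_zero]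
      simp [nimProductHalfN]
    · rw [halfA_succ n a h, halfB_succ, halfA_eq_halfB n, halfA_eq_halfB n, halfA_eq_halfB n,
          Nat.xor_comm (a / 2 ^ 2 ^ n) (a % 2 ^ 2 ^ n)]

theorem mulB_zero_right : ∀ n a, nimMulB n a 0 = 0
  | 0, a => Nat.and_zero a
  | n+1, a => by
    rw [mulB_succ]
    simp [mulB_zero_right n, halfB_zero, Nat.zero_shiftLeft]

theorem mulB_comm : ∀ n a b, nimMulB n a b = nimMulB n b a
  | 0, a, b => Nat.and_comm a b
  | n+1, a, b => by
    rw [mulB_succ, mulB_succ,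
        mulB_comm n (a % 2 ^ 2 ^ n) (b / 2 ^ 2 ^ n),
        mulB_comm n (a / 2 ^ 2 ^ n) (b % 2 ^ 2 ^ n),
        mulB_comm n (a / 2 ^ 2 ^ n) (b / 2 ^ 2 ^ n),
        mulB_comm n (a % 2 ^ 2 ^ n) (b % 2 ^ 2 ^ n),
        Nat.xor_comm (nimMulB n (b / 2 ^ 2 ^ n) (a % 2 ^ 2 ^ n)) (nimMulB n (b % 2 ^ 2 ^ n) (a / 2 ^ 2 ^ n))]

theorem mulB_zero_left (n b : Nat) : nimMulB n 0 b = 0 := by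
  rw [mulB_comm]; exact mulB_zero_right n b

theorem mulB_lt : ∀ n {a b : Nat}, a < 2 ^ 2 ^ n → b < 2 ^ 2 ^ n → nimMulB n a b < 2 ^ 2 ^ n
  | 0, a, b, h, _ => lt_of_le_of_lt (Nat.and_le_left) h
  | n+1, a, b, ha, hb => by
    rw [mulB_succ, pow_two_pow_succ]
    have ha0 : a % 2 ^ 2 ^ n < 2 ^ 2 ^ n := Nat.mod_lt _ (by positivity)
    have hb0 : b % 2 ^ 2 ^ n < 2 ^ 2 ^ n := Nat.mod_lt _ (by positivity)
    have ha1 : a / 2 ^ 2 ^ n < 2 ^ 2 ^ n := div_pow_lt ha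
    have hb1 : b / 2 ^ 2 ^ n < 2 ^ 2 ^ n := div_pow_lt hb
    have hlo : nimMulB n (a % 2 ^ 2 ^ n) (b % 2 ^ 2 ^ n) ^^^
        nimHalfB n (nimMulB n (a / 2 ^ 2 ^ n) (b / 2 ^ 2 ^ n)) < 2 ^ 2 ^ n :=
      Nat.xor_lt_two_pow (mulB_lt n ha0 hb0) (halfB_lt n (mulB_lt n ha1 hb1))
    have hhi : nimMulB n (a % 2 ^ 2 ^ n) (b / 2 ^ 2 ^ n) ^^^
        nimMulB n (a / 2 ^ 2 ^ n) (b % 2 ^ 2 ^ n) ^^^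
        nimMulB n (a / 2 ^ 2 ^ n) (b / 2 ^ 2 ^ n) < 2 ^ 2 ^ n :=
      Nat.xor_lt_two_pow (Nat.xor_lt_two_pow (mulB_lt n ha0 hb1) (mulB_lt n ha1 hb0)) (mulB_lt n ha1 hb1)
    rw [← pow_add]
    exact Nat.append_lt hlo hhi

theorem mulB_xor_right : ∀ n {a x y : Nat}, a < 2 ^ 2 ^ n → x < 2 ^ 2 ^ n → y < 2 ^ 2 ^ n →
    nimMulB n a (x ^^^ y) = nimMulB n a x ^^^ nimMulB n a y
  | 0, a, x, y, _, _, _ => Nat.and_xor_distrib_left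
  | n+1, a, x, y, ha, hx, hy => by
    have ha0 : a % 2 ^ 2 ^ n < 2 ^ 2 ^ n := Nat.mod_lt _ (by positivity)
    have hx0 : x % 2 ^ 2 ^ n < 2 ^ 2 ^ n := Nat.mod_lt _ (by positivity)
    have hy0 : y % 2 ^ 2 ^ n < 2 ^ 2 ^ n := Nat.mod_lt _ (by positivity)
    have ha1 : a / 2 ^ 2 ^ n < 2 ^ 2 ^ n := div_pow_lt ha
    have hx1 : x / 2 ^ 2 ^ n < 2 ^ 2 ^ n := div_pow_lt hx
    have hy1 : y / 2 ^ 2 ^ n < 2 ^ 2 ^ n := div_pow_lt hy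
    rw [mulB_succ, mulB_succ, mulB_succ, mod_pow_xor, div_pow_xor,
        mulB_xor_right n ha0 hx1 hy1, mulB_xor_right n ha1 hx0 hy0,
        mulB_xor_right n ha1 hx1 hy1, mulB_xor_right n ha0 hx0 hy0,
        halfB_xor n (mulB_lt n ha1 hx1) (mulB_lt n ha1 hy1)]
    rw [← append_linear _ _
      (Nat.xor_lt_two_pow (mulB_lt n ha0 hx0) (halfB_lt n (mulB_lt n ha1 hx1)))
      (Nat.xor_lt_two_pow (mulB_lt n ha0 hy0) (halfB_lt n (mulB_lt n ha1 hy1)))]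
    exact append_congr
      (by simp [Nat.xor_comm, nxor_left_comm])
      (by simp [Nat.xor_comm, nxor_left_comm])

theorem mulB_xor_left (n : Nat) {x y b : Nat} (hx : x < 2 ^ 2 ^ n) (hy : y < 2 ^ 2 ^ n)
    (hb : b < 2 ^ 2 ^ n) : nimMulB n (x ^^^ y) b = nimMulB n x b ^^^ nimMulB n y b := by
  rw [mulB_comm, mulB_xor_right n hb hx hy, mulB_comm n b x, mulB_comm n b y]

theorem mulB_one_one : ∀ n, nimMulB n 1 1 = 1
  | 0 => rfl
  | n+1 => by
    have h2 := two_le_pow_pow n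
    have h1 : (1:Nat) % 2 ^ 2 ^ n = 1 := Nat.mod_eq_of_lt (by omega)
    have h0 : (1:Nat) / 2 ^ 2 ^ n = 0 := Nat.div_eq_of_lt (by omega)
    rw [mulB_succ, h1, h0]
    simp [mulB_zero_left, mulB_zero_right, mulB_one_one n, halfB_zero, Nat.zero_shiftLeft]

theorem mulB_stable {n : Nat} {a b : Nat} (ha : a < 2 ^ 2 ^ n) (hb : b < 2 ^ 2 ^ n) :
    nimMulB (n+1) a b = nimMulB n a b := by
  rw [mulB_succ, Nat.mod_eq_of_lt ha, Nat.mod_eq_of_lt hb,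
      Nat.div_eq_of_lt ha, Nat.div_eq_of_lt hb]
  simp [mulB_zero_left, mulB_zero_right, halfB_zero, Nat.zero_shiftLeft]

theorem mulB_stable_ge : ∀ (k n : Nat) {a b : Nat}, a < 2 ^ 2 ^ n → b < 2 ^ 2 ^ n →
    nimMulB (n + k) a b = nimMulB n a b
  | 0, n, a, b, _, _ => rfl
  | k+1, n, a, b, ha, hb => by
    have hmono : (2:Nat) ^ 2 ^ n ≤ 2 ^ 2 ^ (n + k) :=
      Nat.pow_le_pow_right (by norm_num) (Nat.pow_le_pow_right (by norm_num) (by omega))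
    have : n + (k+1) = (n + k) + 1 := by omega
    rw [this, mulB_stable (lt_of_lt_of_le ha hmono) (lt_of_lt_of_le hb hmono),
        mulB_stable_ge k n ha hb]

theorem mulB_of_le {n m : Nat} {a b : Nat} (h : n ≤ m) (ha : a < 2 ^ 2 ^ n) (hb : b < 2 ^ 2 ^ n) :
    nimMulB m a b = nimMulB n a b := by
  have : m = n + (m - n) := by omega
  rw [this, mulB_stable_ge (m - n) n ha hb]

theorem squareN_eq : ∀ μ a n, a < μ → a < 2 ^ 2 ^ n → nimSquareN μ a = nimMulB n a a := by
  intro μ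
  induction μ with
  | zero => intro a n hfuel _; exact absurd hfuel (Nat.not_lt_zero _)
  | succ μ ih =>
    intro a n hfuel h
    by_cases h1 : a ≤ 1
    · interval_cases a
      · simp [nimSquareN, mulB_zero_right]
      · simp [nimSquareN, mulB_one_one]
    · have h2 : 2 ≤ a := by omega
      obtain ⟨k, hk⟩ : ∃ k, nimLvN a = k + 1 := ⟨nimLvN a - 1, by have := lvN_one_le h2; omega⟩
      have hub : a < 2 ^ 2 ^ (k+1) := by rw [← hk]; exact lvN_upper a
      have hlb : 2 ^ 2 ^ k ≤ a := by have := lvN_lower h2; rw [hk] at this; simpa using this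
      have hle : nimLvN a ≤ n := lvN_le_of_lt h2 h
      have ha0 : a % 2 ^ 2 ^ k < 2 ^ 2 ^ k := Nat.mod_lt _ (by positivity)
      have ha1 : a / 2 ^ 2 ^ k < 2 ^ 2 ^ k := div_pow_lt hub
      have hstep : nimMulB n a a = nimMulB (k+1) a a := mulB_of_le (by omega) hub hub
      rw [hstep, mulB_succ]
      rw [mulB_comm k (a % 2 ^ 2 ^ k) (a / 2 ^ 2 ^ k)]
      rw [nimSquareN, if_neg h1]
      simp only [splitN_fst, splitN_snd, hk, Nat.add_sub_cancel, combineN_eq]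
      rw [ih _ k (by have := lt_of_lt_of_le ha0 hlb; omega) ha0,
          ih _ k (by
            have : a / 2 ^ 2 ^ k < a :=
              Nat.div_lt_self (by omega) (by have := two_le_pow_pow k; omega)
            omega) ha1,
          halfA_eq_halfB]
      rw [Nat.xor_comm (nimHalfB k (nimMulB k (a / 2 ^ 2 ^ k) (a / 2 ^ 2 ^ k)))
            (nimMulB k (a % 2 ^ 2 ^ k) (a % 2 ^ 2 ^ k))]
      congr 2
      rw [Nat.xor_self, Nat.zero_xor]

theorem prodN_eq : ∀ μ a b n, 2*(a+b) + (if a < b then 1 else 0) < μ →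
    a < 2 ^ 2 ^ n → b < 2 ^ 2 ^ n → nimProdN μ a b = nimMulB n a b := by
  intro μ
  induction μ with
  | zero => intro a b n hμ _ _; exact absurd hμ (Nat.not_lt_zero _)
  | succ μ ihμ =>
    intro a b n hμ ha hb
    by_cases heq : a = b
    · subst heq
      rw [nimProdN, if_pos rfl]
      exact squareN_eq (a+1) a n (by omega) ha
    · by_cases hlt : a < b
      · rw [nimProdN, if_neg heq, if_pos hlt, mulB_comm]
        exact ihμ b a n (by split at hμ <;> split <;> omega) hb ha
      · have hba : b < a := by omega
        by_cases hle : a ≤ 1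
        · have ha1 : a = 1 := by omega
          have hb0 : b = 0 := by omega
          subst ha1; subst hb0
          rw [nimProdN]
          simp [mulB_zero_right]
        · have h2a : 2 ≤ a := by omega
          obtain ⟨k, hk⟩ : ∃ k, nimLvN a = k + 1 := ⟨nimLvN a - 1, by have := lvN_one_le h2a; omega⟩
          have hub : a < 2 ^ 2 ^ (k+1) := by rw [← hk]; exact lvN_upper a
          have hlba : 2 ^ 2 ^ k ≤ a := by have := lvN_lower h2a; rw [hk] at this; simpa using this
          have hlen : nimLvN a ≤ n := lvN_le_of_lt h2a ha
          have ha0 : a % 2 ^ 2 ^ k < 2 ^ 2 ^ k := Nat.mod_lt _ (by positivity)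
          have ha1 : a / 2 ^ 2 ^ k < 2 ^ 2 ^ k := div_pow_lt hub
          have hstep : nimMulB n a b = nimMulB (k+1) a b :=
            mulB_of_le (by omega) hub (lt_trans hba hub)
          by_cases hlv : nimLvN b < nimLvN a
          · -- b lives below the split line: b < 2^2^k
            have hbsmall : b < 2 ^ 2 ^ k := by
              by_cases hb1 : b ≤ 1
              · have := two_le_pow_pow k; omega
              · have h2b : 2 ≤ b := by omega
                have : nimLvN b ≤ k := by omega
                calc b < 2 ^ 2 ^ nimLvN b := lvN_upper b
                  _ ≤ 2 ^ 2 ^ k := Nat.pow_le_pow_right (by norm_num)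
                      (Nat.pow_le_pow_right (by norm_num) this)
            rw [hstep, mulB_succ, Nat.mod_eq_of_lt hbsmall, Nat.div_eq_of_lt hbsmall]
            rw [nimProdN, if_neg heq, if_neg hlt, if_neg hle]
            simp only [hk, Nat.add_sub_cancel]
            have hlv' : nimLvN b < k + 1 := by rw [← hk]; exact hlv
            rw [if_pos hlv']
            simp only [splitN_fst, splitN_snd, combineN_eq]
            rw [ihμ (a % 2 ^ 2 ^ k) b k (by
                  have : a % 2 ^ 2 ^ k < a := lt_of_lt_of_le ha0 hlba
                  split at hμ <;> split <;> omega) ha0 hbsmall,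
                ihμ (a / 2 ^ 2 ^ k) b k (by
                  have : a / 2 ^ 2 ^ k < a := Nat.div_lt_self (by omega) (by have := two_le_pow_pow k; omega)
                  split at hμ <;> split <;> omega) ha1 hbsmall]
            simp [mulB_zero_right, halfB_zero]
          · -- equal levels
            have h2b : 2 ≤ b := by
              by_contra hb1
              have : nimLvN b = 0 := lvN_zero (by omega)
              omega
            have hlvb : nimLvN b = nimLvN a := by
              have : nimLvN b ≤ nimLvN a := lvN_le_of_lt h2b (by
                calc b < a := hba
                  _ < 2 ^ 2 ^ nimLvN a := lvN_upper a)
              omega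
            have hlbb : 2 ^ 2 ^ k ≤ b := by
              have := lvN_lower h2b
              rw [hlvb, hk] at this; simpa using this
            have hb0 : b % 2 ^ 2 ^ k < 2 ^ 2 ^ k := Nat.mod_lt _ (by positivity)
            have hb1 : b / 2 ^ 2 ^ k < 2 ^ 2 ^ k := div_pow_lt (lt_trans hba hub)
            rw [hstep, mulB_succ]
            rw [nimProdN, if_neg heq, if_neg hlt, if_neg hle]
            simp only [hk, Nat.add_sub_cancel]
            have hlv' : ¬ nimLvN b < k + 1 := by rw [← hk]; exact hlv
            rw [if_neg hlv']
            simp only [splitN_fst, splitN_snd, combineN_eq]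
            have hxa : a % 2 ^ 2 ^ k ^^^ a / 2 ^ 2 ^ k < 2 ^ 2 ^ k := Nat.xor_lt_two_pow ha0 ha1
            have hxb : b % 2 ^ 2 ^ k ^^^ b / 2 ^ 2 ^ k < 2 ^ 2 ^ k := Nat.xor_lt_two_pow hb0 hb1
            rw [ihμ (a % 2 ^ 2 ^ k) (b % 2 ^ 2 ^ k) k (by
                  have h1 : a % 2 ^ 2 ^ k < a := lt_of_lt_of_le ha0 hlba
                  have h2 : b % 2 ^ 2 ^ k ≤ b := Nat.mod_le _ _
                  split at hμ <;> split <;> omega) ha0 hb0,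
                ihμ (a % 2 ^ 2 ^ k ^^^ a / 2 ^ 2 ^ k) (b % 2 ^ 2 ^ k ^^^ b / 2 ^ 2 ^ k) k (by
                  have h1 : a % 2 ^ 2 ^ k ^^^ a / 2 ^ 2 ^ k < a := lt_of_lt_of_le hxa hlba
                  have h2 : b % 2 ^ 2 ^ k ^^^ b / 2 ^ 2 ^ k < b := lt_of_lt_of_le hxb hlbb
                  split at hμ <;> split <;> omega) hxa hxb,
                ihμ (a / 2 ^ 2 ^ k) (b / 2 ^ 2 ^ k) k (by
                  have h1 : a / 2 ^ 2 ^ k < a := Nat.div_lt_self (by omega) (by have := two_le_pow_pow k; omega)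
                  have h2 : b / 2 ^ 2 ^ k ≤ b := Nat.div_le_self _ _
                  split at hμ <;> split <;> omega) ha1 hb1,
                halfA_eq_halfB,
                mulB_xor_left k ha0 ha1 hxb,
                mulB_xor_right k ha0 hb0 hb1,
                mulB_xor_right k ha1 hb0 hb1]
            exact append_congr
              (by simp [Nat.xor_comm, nxor_left_comm, Nat.xor_self, Nat.zero_xor])
              rfl

theorem sum_halves_lt {da db ea eb : Nat} (h1 : da ≤ ea / 2) (h2 : db ≤ eb / 2)
    (h : ea ≠ 0 ∨ eb ≠ 0) : da + db < ea + eb := by omega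

theorem nimLevelB_bounds_aux : ∀ μ a b n, a >>> (1 <<< n) + b >>> (1 <<< n) < μ →
    a < 2 ^ 2 ^ nimLevelB μ a b n ∧ b < 2 ^ 2 ^ nimLevelB μ a b n := by
  intro μ
  induction μ with
  | zero => intro a b n hμ; exact absurd hμ (Nat.not_lt_zero _)
  | succ μ ihμ =>
    intro a b n hμ
    by_cases h : a >>> (1 <<< n) = 0 ∧ b >>> (1 <<< n) = 0
    · rw [nimLevelB, if_pos h]
      obtain ⟨h1, h2⟩ := h
      rw [Nat.one_shiftLeft, Nat.shiftRight_eq_div_pow] at h1 h2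
      exact ⟨Nat.lt_of_div_eq_zero (by positivity) h1, Nat.lt_of_div_eq_zero (by positivity) h2⟩
    · rw [nimLevelB, if_neg h]
      apply ihμ
      simp only [Nat.shiftRight_eq_div_pow] at h hμ ⊢
      exact lt_of_lt_of_le
        (sum_halves_lt (div_pow_shiftLeft_succ_le a n) (div_pow_shiftLeft_succ_le b n)
          (not_and_or.mp h))
        (Nat.lt_succ_iff.mp hμ)

theorem nimLevelB_bounds (a b : Nat) :
    a < 2 ^ 2 ^ nimLevelB (a + b + 1) a b 0 ∧ b < 2 ^ 2 ^ nimLevelB (a + b + 1) a b 0 := by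
  apply nimLevelB_bounds_aux
  have e : (1:Nat) <<< 0 = 1 := rfl
  rw [e, Nat.shiftRight_eq_div_pow, Nat.shiftRight_eq_div_pow, pow_one]
  omega


-- bridges: on the nonnegative domain the Int port computes the ℕ-model exactly
theorem pyAnd_cast (m n : Nat) : pyAnd (m : Int) (n : Int) = ((m &&& n : Nat) : Int) := by
  unfold pyAnd
  simp only [Int.ofNat_eq_natCast]
  rw [if_pos (Int.natCast_nonneg m), if_pos (Int.natCast_nonneg n)]
  simp

theorem pyOr_cast (m n : Nat) : pyOr (m : Int) (n : Int) = ((m ||| n : Nat) : Int) := by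
  unfold pyOr
  simp only [Int.ofNat_eq_natCast]
  rw [if_pos (Int.natCast_nonneg m), if_pos (Int.natCast_nonneg n)]
  simp

theorem pyXor_cast (m n : Nat) : pyXor (m : Int) (n : Int) = ((m ^^^ n : Nat) : Int) := by
  unfold pyXor
  simp only [Int.ofNat_eq_natCast]
  rw [if_pos (Int.natCast_nonneg m), if_pos (Int.natCast_nonneg n)]
  simp

theorem lvI_cast (m : Nat) : nimLvI (m : Int) = nimLvN m := by
  unfold nimLvI nimLvN
  by_cases h : m ≤ 1
  · rw [if_pos (by exact_mod_cast h), if_pos h]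
  · rw [if_neg (by exact_mod_cast h), if_neg h]
    simp

theorem combineI_cast (n lo hi : Nat) :
    nimCombineI n (lo : Int) (hi : Int) = ((nimCombineN n lo hi : Nat) : Int) := by
  unfold nimCombineI
  have e : ((hi : Int)) * (2:Int) ^ (2 ^ n) = ((hi <<< 2 ^ n : Nat) : Int) := by
    rw [Nat.shiftLeft_eq]
    push_cast
    ring
  rw [e, pyOr_cast, combineN_eq]

theorem splitI_cast (n m : Nat) :
    nimSplitI n (m : Int) = (((nimSplitN n m).1 : Int), ((nimSplitN n m).2 : Int)) := by
  unfold nimSplitI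
  rw [splitN_fst, splitN_snd, ← Nat.and_two_pow_sub_one_eq_mod, ← Nat.shiftRight_eq_div_pow]
  have e : ((2:Int) ^ (2 ^ n) - 1) = ((2 ^ 2 ^ n - 1 : Nat) : Int) := by
    have h1 : (1:Nat) ≤ 2 ^ 2 ^ n := Nat.one_le_two_pow
    push_cast [h1]
    ring
  have e3 : ((2:Int) ^ n) = ((2 ^ n : Nat) : Int) := by push_cast; ring
  rw [e, pyAnd_cast, e3, Int.shiftRight_natCast]

theorem halfI_eqI : ∀ n (m : Nat), nimProductHalfI n (m : Int) = ((nimProductHalfN n m : Nat) : Int)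
  | 0, _ => rfl
  | n+1, m => by
    unfold nimProductHalfI nimProductHalfN
    by_cases h : m = 0
    · rw [if_pos (by exact_mod_cast h), if_pos h]
      rfl
    · rw [if_neg (by exact_mod_cast h), if_neg h]
      simp only [splitI_cast]
      rw [pyXor_cast, halfI_eqI n, halfI_eqI n, halfI_eqI n, combineI_cast]

theorem squareI_eqI : ∀ μ (m : Nat), nimSquareI μ (m : Int) = ((nimSquareN μ m : Nat) : Int)
  | 0, _ => rfl
  | μ+1, m => by
    unfold nimSquareI nimSquareN
    by_cases h : m ≤ 1
    · rw [if_pos (by exact_mod_cast h), if_pos h]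
    · rw [if_neg (by exact_mod_cast h), if_neg h]
      simp only [lvI_cast, splitI_cast]
      rw [squareI_eqI μ, squareI_eqI μ, halfI_eqI, pyXor_cast, combineI_cast]

theorem prodI_eqI : ∀ μ (m k : Nat), nimProdI μ (m : Int) (k : Int) = ((nimProdN μ m k : Nat) : Int)
  | 0, _, _ => rfl
  | μ+1, m, k => by
    unfold nimProdI nimProdN
    by_cases h1 : m = k
    · subst h1
      rw [if_pos rfl, if_pos rfl, Int.natAbs_natCast]
      exact squareI_eqI (m+1) m
    · rw [if_neg (by exact_mod_cast h1), if_neg h1]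
      by_cases h2 : m < k
      · rw [if_pos (by exact_mod_cast h2), if_pos h2]
        exact prodI_eqI μ k m
      · rw [if_neg (by exact_mod_cast h2), if_neg h2]
        by_cases h3 : m ≤ 1
        · rw [if_pos (by exact_mod_cast h3), if_pos h3]
          exact pyAnd_cast m k
        · rw [if_neg (by exact_mod_cast h3), if_neg h3]
          simp only [lvI_cast, splitI_cast]
          by_cases h4 : nimLvN k < nimLvN m
          · rw [if_pos h4, if_pos h4, prodI_eqI μ, prodI_eqI μ, combineI_cast]
          · rw [if_neg h4, if_neg h4]
            simp only [pyXor_cast]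
            rw [prodI_eqI μ, prodI_eqI μ, prodI_eqI μ, halfI_eqI, pyXor_cast, pyXor_cast,
                combineI_cast]


-- Python & | facts used for the small-factor branches
theorem pyAnd_comm (x y : Int) : pyAnd x y = pyAnd y x := by
  unfold pyAnd
  by_cases hx : 0 ≤ x <;> by_cases hy : 0 ≤ y <;>
    simp [hx, hy, Nat.land_comm, Nat.lor_comm]

theorem pyAnd_self (x : Int) : pyAnd x x = x := by
  unfold pyAnd
  by_cases hx : 0 ≤ x
  · rw [if_pos hx, if_pos hx]
    simp only [Int.ofNat_eq_natCast, Nat.and_self]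
    omega
  · rw [if_neg hx, if_neg hx]
    simp only [Int.ofNat_eq_natCast, Nat.or_self]
    omega

-- cast bridges for port B's primitives on nonnegative inputs
theorem pyAnd_mask_cast (n m : Nat) :
    pyAnd (m : Int) ((2:Int) ^ (2 ^ n) - 1) = ((m % 2 ^ 2 ^ n : Nat) : Int) := by
  have e : ((2:Int) ^ (2 ^ n) - 1) = ((2 ^ 2 ^ n - 1 : Nat) : Int) := by
    have h1 : (1:Nat) ≤ 2 ^ 2 ^ n := Nat.one_le_two_pow
    push_cast [h1]
    ring
  rw [e, pyAnd_cast, Nat.and_two_pow_sub_one_eq_mod]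

theorem shr_cast (n m : Nat) : (m : Int) >>> ((2:Int) ^ n) = ((m / 2 ^ 2 ^ n : Nat) : Int) := by
  have e3 : ((2:Int) ^ n) = ((2 ^ n : Nat) : Int) := by push_cast; ring
  rw [e3, Int.shiftRight_natCast, Nat.shiftRight_eq_div_pow]

theorem mulpow_cast (n x : Nat) : ((x : Int)) * (2:Int) ^ (2 ^ n) = ((x <<< 2 ^ n : Nat) : Int) := by
  rw [Nat.shiftLeft_eq]
  push_cast
  ring

theorem halfBI_cast : ∀ n (m : Nat), nimHalfBI n (m : Int) = ((nimHalfB n m : Nat) : Int)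
  | 0, _ => rfl
  | n+1, m => by
    unfold nimHalfBI
    rw [halfB_succ]
    simp only [pyAnd_mask_cast, shr_cast]
    rw [pyXor_cast, halfBI_cast n, halfBI_cast n, halfBI_cast n, mulpow_cast, pyOr_cast]

theorem mulBI_cast : ∀ n (m k : Nat), nimMulBI n (m : Int) (k : Int) = ((nimMulB n m k : Nat) : Int)
  | 0, m, k => pyAnd_cast m k
  | n+1, m, k => by
    unfold nimMulBI
    rw [mulB_succ]
    simp only [pyAnd_mask_cast, shr_cast]
    rw [mulBI_cast n, mulBI_cast n, mulBI_cast n, mulBI_cast n, halfBI_cast,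
        pyXor_cast, pyXor_cast, pyXor_cast, mulpow_cast, pyOr_cast, Nat.xor_assoc]

theorem levelBI_cast : ∀ μ (m k : Nat) (n : Nat),
    nimLevelBI μ (m : Int) (k : Int) n = nimLevelB μ m k n
  | 0, _, _, _ => rfl
  | μ+1, m, k, n => by
    unfold nimLevelBI nimLevelB
    have e1 : ((2:Int) ^ (2 ^ n) ≤ (m : Int) ∨ (2:Int) ^ (2 ^ n) ≤ (k : Int)) ↔
        ¬ (m >>> (1 <<< n) = 0 ∧ k >>> (1 <<< n) = 0) := by
      rw [Nat.one_shiftLeft, Nat.shiftRight_eq_div_pow, Nat.shiftRight_eq_div_pow]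
      have hm : (2:Int) ^ (2 ^ n) ≤ (m : Int) ↔ 2 ^ 2 ^ n ≤ m := by
        constructor
        · intro h; exact_mod_cast h
        · intro h; exact_mod_cast h
      have hk : (2:Int) ^ (2 ^ n) ≤ (k : Int) ↔ 2 ^ 2 ^ n ≤ k := by
        constructor
        · intro h; exact_mod_cast h
        · intro h; exact_mod_cast h
      rw [hm, hk, Nat.div_eq_zero_iff_lt (by positivity), Nat.div_eq_zero_iff_lt (by positivity)]
      omega
    by_cases h : m >>> (1 <<< n) = 0 ∧ k >>> (1 <<< n) = 0
    · rw [if_neg (by rw [e1]; exact not_not_intro h), if_pos h]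
    · rw [if_pos (e1.mpr h), if_neg h, levelBI_cast μ]

-- on pairs with both factors ≤ 1 the level loop stops at 0 and B is a single bitwise and
theorem altB_small {a b : Int} (ha : a ≤ 1) (hb : b ≤ 1) :
    nimber_product_alt a b = pyAnd a b := by
  unfold nimber_product_alt
  rw [nimLevelBI]
  rw [if_neg (by
    rintro (h | h) <;> · simp only [pow_zero, pow_one] at h; omega)]
  rfl

-- A on pairs with both factors ≤ 1 is also a single bitwise and
theorem prodI_small : ∀ μ (a b : Int), 2 ≤ μ → a ≤ 1 → b ≤ 1 → nimProdI μ a b = pyAnd a b := by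
  intro μ a b hμ ha hb
  obtain ⟨ν, rfl⟩ : ∃ ν, μ = ν + 1 := ⟨μ - 1, by omega⟩
  rw [nimProdI]
  by_cases heq : a = b
  · subst heq
    rw [if_pos rfl, nimSquareI, if_pos ha, pyAnd_self]
  · rw [if_neg heq]
    by_cases hlt : a < b
    · rw [if_pos hlt]
      obtain ⟨ρ, rfl⟩ : ∃ ρ, ν = ρ + 1 := ⟨ν - 1, by omega⟩
      rw [nimProdI, if_neg (by omega : ¬ b = a), if_neg (by omega : ¬ b < a), if_pos hb,
          pyAnd_comm]
    · rw [if_neg hlt, if_pos ha]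

-- ===== VERDICT (by name: the statement is the Claim_ definition above) =====
theorem nimber_product_spec : Claim_equal_nimber_product := by
  intro a b _ hpre
  show nimber_product a b = nimber_product_alt a b
  by_cases hnn : 0 ≤ a ∧ 0 ≤ b
  · obtain ⟨ha, hb⟩ := hnn
    obtain ⟨m, rfl⟩ : ∃ m : Nat, a = (m : Int) := ⟨a.toNat, (Int.toNat_of_nonneg ha).symm⟩
    obtain ⟨k, rfl⟩ : ∃ k : Nat, b = (k : Int) := ⟨b.toNat, (Int.toNat_of_nonneg hb).symm⟩
    unfold nimber_product nimber_product_alt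
    simp only [Int.natAbs_natCast]
    rw [levelBI_cast, mulBI_cast, prodI_eqI]
    congr 1
    obtain ⟨h1, h2⟩ := nimLevelB_bounds m k
    exact prodN_eq (2 * (m + k) + 2) _ _ _ (by split <;> omega) h1 h2
  · have hsmall : a ≤ 1 ∧ b ≤ 1 := by
      rcases hpre with h | h
      · exact absurd h hnn
      · exact h
    unfold nimber_product
    rw [prodI_small _ _ _ (by omega) hsmall.1 hsmall.2, altB_small hsmall.1 hsmall.2]
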